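-- pv_equiv track=rewrite | github.com/YanisMikulskis/lessons-by-leetcode | contests/q3.py | maxContainers
-- ===== SOURCE A (Python) =====
-- def maxContainers(n: int, w: int, maxWeight: int) -> int:
--     max_dockers = n * n
--     max_w_dockers = max_dockers * w
--
--     if max_w_dockers < maxWeight:
--         return max_w_dockers // w
--     while max_w_dockers > maxWeight:
--         max_w_dockers -= w
--
--
--     return max_w_dockers // w
-- ===== SOURCE B (Python) =====
-- def maxContainers(n: int, w: int, maxWeight: int) -> int:
--     # Closed form: n*n containers fit if their total weight is within the limit,
--     # otherwise the limit divided by the per-container weight caps the count.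
--     m = n * n
--     if m * w <= maxWeight:
--         return m
--     return maxWeight // w
-- ===== Notes on version B (the rewrite author's own statement) =====
-- stated objective: faster
-- what changed: Replaces A's decrement-by-w while loop (up to n*n iterations) with the O(1) closed form: n*n if n*n*w <= maxWeight else maxWeight // w.
import Mathlib
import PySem

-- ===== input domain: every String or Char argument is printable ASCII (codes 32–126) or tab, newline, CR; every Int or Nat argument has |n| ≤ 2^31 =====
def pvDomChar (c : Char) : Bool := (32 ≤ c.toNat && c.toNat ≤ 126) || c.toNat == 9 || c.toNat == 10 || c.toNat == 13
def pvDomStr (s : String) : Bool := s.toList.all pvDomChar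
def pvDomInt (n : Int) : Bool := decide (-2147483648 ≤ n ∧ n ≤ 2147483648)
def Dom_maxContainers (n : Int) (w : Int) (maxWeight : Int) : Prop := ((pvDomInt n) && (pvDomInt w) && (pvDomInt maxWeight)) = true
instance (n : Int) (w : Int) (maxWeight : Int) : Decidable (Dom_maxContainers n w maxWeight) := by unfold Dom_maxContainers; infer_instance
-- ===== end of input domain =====

-- B replaces A's decrement-by-w while loop with an O(1) closed form (same value wherever A returns).


-- ===== PORT A =====
-- A's 'while max_w_dockers > maxWeight: max_w_dockers -= w', fuel-bounded to make it total;
-- fuel (mw - maxWeight).toNat is enough whenever w ≥ 1 (each iteration decreases mw by w ≥ 1).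
def maxContainersLoop (mw : Int) (maxWeight : Int) (w : Int) : Nat → Int
  | 0 => mw
  | fuel + 1 => if mw > maxWeight then maxContainersLoop (mw - w) maxWeight w fuel else mw

def maxContainers (n : Int) (w : Int) (maxWeight : Int) : Int :=
  let maxDockers := n * n
  let maxWDockers := maxDockers * w
  if maxWDockers < maxWeight then PySem.Int.floordiv maxWDockers w
  else PySem.Int.floordiv (maxContainersLoop maxWDockers maxWeight w (maxWDockers - maxWeight).toNat) w

-- ===== PORT B =====
def maxContainers_alt (n : Int) (w : Int) (maxWeight : Int) : Int :=
  let m := n * n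
  if m * w ≤ maxWeight then m
  else PySem.Int.floordiv maxWeight w

-- ===== PRECONDITION & SPEC =====
-- Pre_ is exactly the set of inputs on which Python A returns: w = 0 raises ZeroDivisionError
-- (or loops forever for maxWeight < 0), and w < 0 with n*n*w > maxWeight loops forever.
def Pre_maxContainers (n : Int) (w : Int) (maxWeight : Int) : Prop :=
  0 < w ∨ (w < 0 ∧ n * n * w ≤ maxWeight)
instance (n : Int) (w : Int) (maxWeight : Int) : Decidable (Pre_maxContainers n w maxWeight) := by unfold Pre_maxContainers; infer_instance
def pvWitness_maxContainers : Int × Int × Int := (3, 2, 10)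

def Spec_maxContainers (n : Int) (w : Int) (maxWeight : Int) (out : Int) : Prop := out = maxContainers_alt n w maxWeight
instance (n : Int) (w : Int) (maxWeight : Int) (out : Int) : Decidable (Spec_maxContainers n w maxWeight out) := by unfold Spec_maxContainers; infer_instance

-- ===== CLAIM (what is proved, stated in full; the proofs are below) =====
def Claim_equal_maxContainers : Prop := ∀ (n : Int) (w : Int) (maxWeight : Int), Dom_maxContainers n w maxWeight → Pre_maxContainers n w maxWeight → Spec_maxContainers n w maxWeight (maxContainers n w maxWeight)

-- ===== LEMMAS AND PROOFS =====

-- exact cancellation m * w // w = m for w ≠ 0 (Python floor division is exact here)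
theorem pv_floordiv_mul_cancel (m w : Int) (hw : w ≠ 0) :
    PySem.Int.floordiv (m * w) w = m := by
  simp [PySem.Int.floordiv, Int.mul_fdiv_cancel _ hw]

-- the loop, run with enough fuel and positive w, lands on the greatest multiple of w ≤ maxWeight
theorem pv_loop_eval (w maxWeight : Int) (hw : 0 < w) :
    ∀ (fuel : Nat) (m : Int), m * w - maxWeight ≤ (fuel : Int) →
      maxContainersLoop (m * w) maxWeight w fuel =
        if m * w ≤ maxWeight then m * w else PySem.Int.floordiv maxWeight w * w := by
  intro fuel
  induction fuel with
  | zero =>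
      intro m h
      simp only [Nat.cast_zero] at h
      simp [maxContainersLoop, show m * w ≤ maxWeight by omega]
  | succ f ih =>
      intro m h
      by_cases hle : m * w ≤ maxWeight
      · simp [maxContainersLoop, show ¬ (m * w > maxWeight) by omega, hle]
      · have hgt : m * w > maxWeight := by omega
        have hstep : m * w - w = (m - 1) * w := by ring
        have hfuel : (m - 1) * w - maxWeight ≤ (f : Int) := by
          push_cast at h ⊢; nlinarith
        have := ih (m - 1) hfuel
        rw [maxContainersLoop, if_pos hgt, hstep, this]
        by_cases h2 : (m - 1) * w ≤ maxWeight
        · have hq : PySem.Int.floordiv maxWeight w = m - 1 :=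
            (PySem.Int.floordiv_eq_iff_of_pos hw).2 ⟨h2, by nlinarith⟩
          simp [h2, hq, hle]
        · simp [h2, show ¬ (m * w ≤ maxWeight) from hle]

theorem maxContainers_eq (n w maxWeight : Int)
    (hpre : Pre_maxContainers n w maxWeight) :
    maxContainers n w maxWeight = maxContainers_alt n w maxWeight := by
  unfold maxContainers maxContainers_alt
  set m := n * n with hm
  rcases hpre with hw | ⟨hw, hle⟩
  · -- w > 0
    have hw0 : w ≠ 0 := by omega
    by_cases hlt : m * w < maxWeight
    · simp [hlt, show m * w ≤ maxWeight by omega, pv_floordiv_mul_cancel m w hw0]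
    · have hge : maxWeight ≤ m * w := by omega
      have hfuel : m * w - maxWeight ≤ (((m * w - maxWeight).toNat : Nat) : Int) := by
        omega
      rw [if_neg hlt, pv_loop_eval w maxWeight hw _ m hfuel]
      by_cases heq : m * w ≤ maxWeight
      · simp [heq, pv_floordiv_mul_cancel m w hw0]
      · simp [heq, pv_floordiv_mul_cancel (PySem.Int.floordiv maxWeight w) w hw0]
  · -- w < 0 and m * w ≤ maxWeight: loop guard is false (or the 'if' branch), result m
    have hw0 : w ≠ 0 := by omega
    have hle' : m * w ≤ maxWeight := hm ▸ hle
    by_cases hlt : m * w < maxWeight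
    · simp [hlt, hle', pv_floordiv_mul_cancel m w hw0]
    · have heq : m * w = maxWeight := by omega
      have h0 : (m * w - maxWeight).toNat = 0 := by omega
      rw [if_neg hlt, h0]
      simp [maxContainersLoop, hle', pv_floordiv_mul_cancel m w hw0]

-- ===== VERDICT (by name: the statement is the Claim_ definition above) =====
theorem maxContainers_spec : Claim_equal_maxContainers := by
  intro n w maxWeight _ hpre
  exact maxContainers_eq n w maxWeight hpre
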